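-- pv_equiv track=rewrite | github.com/otisscott/1114-Stuff | Lab 8/lab8.py | make_alpha_string
-- ===== SOURCE A (Python) =====
-- def make_alpha_string(ch, n):
--     final = ""
--     start = ord(ch)
--     for each in range(n):
--         final += chr(start + each)
--         if start + each >= 122:
--             start = 96 - each
--     return final
-- ===== SOURCE B (Python) =====
-- def make_alpha_string(ch, n):
--     if n <= 0:
--         return ""
--     start = ord(ch)
--     if start >= 122:
--         head = chr(start)
--     else:
--         head = "".join(chr(c) for c in range(start, 123))
--     pattern = head + "abcdefghijklmnopqrstuvwxyz" * (n // 26 + 1)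
--     return pattern[:n]
-- ===== Notes on version B (the rewrite author's own statement) =====
-- stated objective: alternative
-- what changed: Replaces A's per-character loop with its start=96-each reset trick by computing a head string (codes ord(ch)..122, or just ch when ord(ch) >= 122), appending enough copies of the 26-letter alphabet, and slicing the pattern to n characters.
import Mathlib
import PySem

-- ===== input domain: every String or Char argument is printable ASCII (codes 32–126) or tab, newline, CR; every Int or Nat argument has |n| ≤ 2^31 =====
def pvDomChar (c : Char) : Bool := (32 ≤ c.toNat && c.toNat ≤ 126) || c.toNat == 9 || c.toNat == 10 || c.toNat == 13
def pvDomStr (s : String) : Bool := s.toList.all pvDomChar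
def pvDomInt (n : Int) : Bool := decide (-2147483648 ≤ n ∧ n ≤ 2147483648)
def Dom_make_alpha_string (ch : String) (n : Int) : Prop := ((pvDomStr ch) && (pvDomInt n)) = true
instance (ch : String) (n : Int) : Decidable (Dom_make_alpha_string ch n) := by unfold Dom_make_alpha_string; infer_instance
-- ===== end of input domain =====

-- B replaces A's character-by-character loop with the start=96-each reset trick by building a
-- head (codes ord(ch)..122, or just ch when ord(ch) ≥ 122) plus enough repeated alphabet and
-- slicing the pattern to n characters (objective: alternative decomposition).

-- ===== PORT A =====
-- ord(c) for a 1-char string; Python raises TypeError otherwise (excluded by Pre_).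
def pyOrd (ch : String) : Int :=
  match ch.toList with
  | [c] => (c.toNat : Int)
  | _ => 0

def make_alpha_string (ch : String) (n : Int) : String :=
  let start := pyOrd ch
  -- for each in range(n): final += chr(start + each); if start + each >= 122: start = 96 - each
  -- chr(x) is ported by hand as Char.ofNat x.toNat (exact here: the produced codes stay in 0..126)
  let r := (PySem.List.pyRange 0 n 1).foldl
    (fun (st : List Char × Int) each =>
      (st.1 ++ [Char.ofNat (st.2 + each).toNat],
       if st.2 + each ≥ 122 then 96 - each else st.2))
    ([], start)
  String.ofList r.1

-- ===== PORT B =====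
def pvAlphabet : List Char := "abcdefghijklmnopqrstuvwxyz".toList

def make_alpha_string_alt (ch : String) (n : Int) : String :=
  if n ≤ 0 then "" else
  let start := pyOrd ch
  let head : List Char :=
    if start ≥ 122 then [Char.ofNat start.toNat]
    else (PySem.List.pyRange start 123 1).map (fun c => Char.ofNat c.toNat)
  let pattern := head ++ PySem.List.pyRepeat pvAlphabet (PySem.Int.floordiv n 26 + 1)
  String.ofList (PySem.List.slice pattern none (some n))

-- ===== PRECONDITION & SPEC =====
-- ord(ch) raises TypeError unless ch has exactly one character; A returns on every other input.
def Pre_make_alpha_string (ch : String) (n : Int) : Prop := ch.toList.length = 1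
instance (ch : String) (n : Int) : Decidable (Pre_make_alpha_string ch n) := by unfold Pre_make_alpha_string; infer_instance
def pvWitness_make_alpha_string : String × Int := ("x", 8)

def Spec_make_alpha_string (ch : String) (n : Int) (out : String) : Prop := out = make_alpha_string_alt ch n
instance (ch : String) (n : Int) (out : String) : Decidable (Spec_make_alpha_string ch n out) := by unfold Spec_make_alpha_string; infer_instance

-- ===== CLAIM (what is proved, stated in full; the proofs are below) =====
def Claim_equal_make_alpha_string : Prop := ∀ (ch : String) (n : Int), Dom_make_alpha_string ch n → Pre_make_alpha_string ch n → Spec_make_alpha_string ch n (make_alpha_string ch n)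

-- ===== LEMMAS AND PROOFS =====

-- the character code emitted at step k (start code s0, wrap to 'a' after any code ≥ 122)
def pvF (s0 : Nat) : Nat → Nat
  | 0 => s0
  | k + 1 => if 122 ≤ pvF s0 k then 97 else pvF s0 k + 1

-- length of the non-periodic head
def pvH (s0 : Nat) : Nat := if 122 ≤ s0 then 1 else 123 - s0

theorem pvF_closed (s0 k : Nat) :
    pvF s0 k = if k < pvH s0 then s0 + k else 97 + (k - pvH s0) % 26 := by
  induction k with
  | zero => unfold pvH; split_ifs <;> simp [pvF] <;> omega
  | succ k ih =>
    rw [pvF, ih]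
    unfold pvH at *
    split_ifs <;> omega

theorem loopA (s0 m : Nat) :
    (List.range m).foldl
      (fun (st : List Char × Int) (k : Nat) =>
        (st.1 ++ [Char.ofNat (st.2 + (k : Int)).toNat],
         if st.2 + (k : Int) ≥ 122 then 96 - (k : Int) else st.2))
      ([], (s0 : Int))
    = ((List.range m).map (fun k => Char.ofNat (pvF s0 k)), ((pvF s0 m : Int) - m)) := by
  induction m with
  | zero => simp [pvF]
  | succ m ih =>
    rw [List.range_succ, List.foldl_append, ih, List.map_append]
    simp only [List.foldl_cons, List.foldl_nil, List.map_cons, List.map_nil]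
    have harg : ((pvF s0 m : Int) - (m : Int) + (m : Int)).toNat = pvF s0 m := by omega
    rw [harg, Prod.mk.injEq]
    refine ⟨rfl, ?_⟩
    have h1 : pvF s0 (m + 1) = if 122 ≤ pvF s0 m then 97 else pvF s0 m + 1 := rfl
    rw [h1]
    split_ifs <;> push_cast <;> omega

theorem A_char (ch : String) (c : Char) (h : ch.toList = [c]) (n : Int) :
    make_alpha_string ch n
      = String.ofList ((List.range n.toNat).map (fun k => Char.ofNat (pvF c.toNat k))) := by
  have hord : pyOrd ch = (c.toNat : Int) := by unfold pyOrd; rw [h]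
  simp only [make_alpha_string, hord, PySem.List.pyRange_one, List.foldl_map, zero_add, sub_zero]
  rw [loopA c.toNat n.toNat]

theorem alphaGet (j : Nat) (hj : j < 26) : pvAlphabet[j]? = some (Char.ofNat (97 + j)) := by
  interval_cases j <;> decide

theorem repGet (t j : Nat) (hj : j < 26 * t) :
    ((List.replicate t pvAlphabet).flatten)[j]? = some (Char.ofNat (97 + j % 26)) := by
  induction t generalizing j with
  | zero => omega
  | succ t ih =>
    rw [List.replicate_succ, List.flatten_cons]
    by_cases hlt : j < 26
    · rw [List.getElem?_append_left (by simpa [pvAlphabet] using hlt)]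
      have : j % 26 = j := by omega
      rw [this]
      exact alphaGet j hlt
    · have hlen : pvAlphabet.length = 26 := by decide
      rw [List.getElem?_append_right (by omega)]
      rw [hlen]
      have hmod : (j - 26) % 26 = j % 26 := by omega
      rw [ih (j - 26) (by omega), hmod]

theorem B_char (ch : String) (c : Char) (h : ch.toList = [c]) (n : Int) :
    make_alpha_string_alt ch n
      = String.ofList ((List.range n.toNat).map (fun k => Char.ofNat (pvF c.toNat k))) := by
  unfold make_alpha_string_alt
  by_cases hn : n ≤ 0
  · rw [if_pos hn]
    have : n.toNat = 0 := by omega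
    rw [this]
    rfl
  · rw [if_neg hn]
    have hord : pyOrd ch = (c.toNat : Int) := by unfold pyOrd; rw [h]
    set s0 := c.toNat with hs0
    have hnn : 0 ≤ n := by omega
    set m := n.toNat with hm
    set T := (PySem.Int.floordiv n 26 + 1).toNat with hT
    have hfd : PySem.Int.floordiv n 26 = n / 26 := PySem.Int.floordiv_eq_ediv_of_pos (by omega)
    have hTpos : (m : Int) ≤ 26 * T := by
      rw [hT, hfd]
      omega
    simp only [hord]
    set head : List Char :=
      (if (s0 : Int) ≥ 122 then [Char.ofNat (s0 : Int).toNat]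
       else (PySem.List.pyRange (s0 : Int) 123 1).map (fun c => Char.ofNat c.toNat)) with hhead
    have hheadlen : head.length = pvH s0 := by
      rw [hhead]
      unfold pvH
      by_cases h1 : 122 ≤ s0
      · rw [if_pos (show (s0 : Int) ≥ 122 by exact_mod_cast h1), if_pos h1]
        rfl
      · rw [if_neg (show ¬ (s0 : Int) ≥ 122 by omega), if_neg h1,
            List.length_map, PySem.List.length_pyRange_one]
        omega
    have hheadget : ∀ k : Nat, k < pvH s0 → head[k]? = some (Char.ofNat (s0 + k)) := by
      intro k hk
      rw [hhead]
      by_cases h1 : 122 ≤ s0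
      · rw [if_pos (show (s0 : Int) ≥ 122 by exact_mod_cast h1)]
        have hk0 : k = 0 := by unfold pvH at hk; rw [if_pos h1] at hk; omega
        subst hk0
        simp only [List.getElem?_cons_zero, Option.some.injEq]
        congr 1
      · rw [if_neg (show ¬ (s0 : Int) ≥ 122 by omega)]
        have hk2 : k < 123 - s0 := by unfold pvH at hk; rw [if_neg h1] at hk; omega
        have hk' : k < ((PySem.List.pyRange (s0 : Int) 123 1).map (fun c => Char.ofNat c.toNat)).length := by
          rw [List.length_map, PySem.List.length_pyRange_one]; omega
        rw [List.getElem?_eq_getElem hk', List.getElem_map, PySem.List.getElem_pyRange_one]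
        congr 2
    have hrep : PySem.List.pyRepeat pvAlphabet (PySem.Int.floordiv n 26 + 1)
        = (List.replicate T pvAlphabet).flatten := rfl
    have hreplen : ((List.replicate T pvAlphabet).flatten).length = 26 * T := by
      rw [List.length_flatten, List.map_replicate, List.sum_replicate]
      have : pvAlphabet.length = 26 := by decide
      rw [this]
      simp [Nat.mul_comm]
    rw [hrep, PySem.List.slice_to _ hnn]
    congr 1
    apply List.ext_getElem?
    intro i
    by_cases hi : i < m
    · rw [List.getElem?_take_of_lt hi]
      have hmaplen : i < ((List.range m).map (fun k => Char.ofNat (pvF s0 k))).length := by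
        simpa using hi
      rw [List.getElem?_eq_getElem hmaplen, List.getElem_map, List.getElem_range]
      rw [pvF_closed]
      by_cases hih : i < pvH s0
      · rw [List.getElem?_append_left (by omega), hheadget i hih, if_pos hih]
      · rw [List.getElem?_append_right (by omega), hheadlen]
        rw [repGet T (i - pvH s0) (by omega), if_neg hih]
    · rw [List.getElem?_eq_none, List.getElem?_eq_none]
      · simpa using hi
      · rw [List.length_take]; omega

-- ===== VERDICT (by name: the statement is the Claim_ definition above) =====
theorem make_alpha_string_spec : Claim_equal_make_alpha_string := by
  intro ch n _ hpre
  unfold Spec_make_alpha_string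
  obtain ⟨c, hc⟩ : ∃ c, ch.toList = [c] := by
    unfold Pre_make_alpha_string at hpre
    cases h : ch.toList with
    | nil => rw [h] at hpre; simp at hpre
    | cons c t =>
      rw [h] at hpre
      cases t with
      | nil => exact ⟨c, rfl⟩
      | cons _ _ => simp at hpre
  rw [A_char ch c hc n, B_char ch c hc n]
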